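-- pv_equiv track=rewrite | github.com/rvazdev-ex/bitescore-dev | src/bitescore/features/cleavage.py | _trypsin_specific_counts
-- ===== SOURCE A (Python) =====
-- def _trypsin_specific_counts(seq: str) -> tuple[int, int]:
--     """Return counts for Lys- and Arg-mediated trypsin bonds."""
--
--     k_count = 0
--     r_count = 0
--     for left, right in zip(seq, seq[1:]):
--         if right == "P":
--             continue
--         if left == "K":
--             k_count += 1
--         if left == "R":
--             r_count += 1
--     return k_count, r_count
-- ===== SOURCE B (Python) =====
-- def _trypsin_specific_counts(seq: str) -> tuple[int, int]:
--     """Return counts for Lys- and Arg-mediated trypsin bonds."""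
--     head = seq[:-1]
--     return (head.count("K") - seq.count("KP"),
--             head.count("R") - seq.count("RP"))
-- ===== Notes on version B (the rewrite author's own statement) =====
-- stated objective: faster
-- what changed: Replaces the explicit adjacent-pair scan with branches by arithmetic on str.count: each count is occurrences of the residue in seq[:-1] minus occurrences of the residue-then-proline digram in seq, exact because such a digram cannot overlap itself.
import Mathlib
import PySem

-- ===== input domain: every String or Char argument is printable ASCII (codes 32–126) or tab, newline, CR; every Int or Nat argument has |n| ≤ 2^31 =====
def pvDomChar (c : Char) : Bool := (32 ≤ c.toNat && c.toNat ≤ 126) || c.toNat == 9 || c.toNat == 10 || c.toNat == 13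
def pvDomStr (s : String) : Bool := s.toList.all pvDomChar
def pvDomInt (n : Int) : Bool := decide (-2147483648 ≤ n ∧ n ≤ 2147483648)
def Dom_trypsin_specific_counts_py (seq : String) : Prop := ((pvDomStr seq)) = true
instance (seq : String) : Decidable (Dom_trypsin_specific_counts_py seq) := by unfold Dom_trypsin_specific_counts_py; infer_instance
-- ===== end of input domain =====

-- B replaces A's adjacent-pair scan by arithmetic on substring counts (idiomatic, same O(n)).


-- ===== PORT A =====
-- 'for left, right in zip(seq, seq[1:])' with the three branches in order.
def trypsin_specific_counts_py (seq : String) : Int × Int :=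
  (List.zip seq.toList (PySem.List.slice seq.toList (some 1) none)).foldl
    (fun (st : Int × Int) p =>
      if p.2 = 'P' then st
      else
        let k := if p.1 = 'K' then st.1 + 1 else st.1
        let r := if p.1 = 'R' then st.2 + 1 else st.2
        (k, r))
    (0, 0)

-- ===== PORT B =====
-- head = seq[:-1]; (head.count("K") - seq.count("KP"), head.count("R") - seq.count("RP"))
def trypsin_specific_counts_py_alt (seq : String) : Int × Int :=
  let head := PySem.Str.slice seq none (some (-1))
  ((PySem.Str.count head "K" : Int) - (PySem.Str.count seq "KP" : Int),
   (PySem.Str.count head "R" : Int) - (PySem.Str.count seq "RP" : Int))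

-- ===== PRECONDITION & SPEC =====
def Spec_trypsin_specific_counts_py (seq : String) (out : Int × Int) : Prop := out = trypsin_specific_counts_py_alt seq
instance (seq : String) (out : Int × Int) : Decidable (Spec_trypsin_specific_counts_py seq out) := by unfold Spec_trypsin_specific_counts_py; infer_instance

-- ===== CLAIM (what is proved, stated in full; the proofs are below) =====
def Claim_equal_trypsin_specific_counts_py : Prop := ∀ (seq : String), Dom_trypsin_specific_counts_py seq → Spec_trypsin_specific_counts_py seq (trypsin_specific_counts_py seq)

-- ===== LEMMAS AND PROOFS =====

-- per-position tally of 'left = c and right ≠ P' over adjacent pairs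
def pvTally (c : Char) : List Char → Int
  | a :: b :: rest => (if b = 'P' then 0 else if a = c then 1 else 0) + pvTally c (b :: rest)
  | _ => 0

-- per-position tally of the pattern [c, 'P']
def pvPairs (c : Char) : List Char → Nat
  | a :: b :: rest => (if a = c ∧ b = 'P' then 1 else 0) + pvPairs c (b :: rest)
  | _ => 0

theorem pvGo_step (sub : List Char) (fuel : Nat) (a : Char) (t : List Char) (acc : Nat) :
    PySem.Chars.count.go sub (fuel + 1) (a :: t) acc =
      if sub.isPrefixOf (a :: t) then
        PySem.Chars.count.go sub fuel (List.drop sub.length (a :: t)) (acc + 1)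
      else PySem.Chars.count.go sub fuel t acc := by
  rw [PySem.Chars.count.go.eq_def]

theorem pvGo_nil (sub : List Char) (fuel acc : Nat) :
    PySem.Chars.count.go sub fuel [] acc = acc := by
  cases fuel <;> rw [PySem.Chars.count.go.eq_def]

theorem pvGo_single (c : Char) : ∀ (fuel : Nat) (l : List Char) (acc : Nat),
    l.length ≤ fuel → PySem.Chars.count.go [c] fuel l acc = acc + l.count c := by
  intro fuel
  induction fuel with
  | zero => intro l acc h; cases l with
      | nil => simp [pvGo_nil]
      | cons a t => simp at h
  | succ n ih =>
    intro l acc h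
    cases l with
    | nil => simp [pvGo_nil]
    | cons a t =>
      rw [pvGo_step]
      simp only [List.length_cons] at h
      by_cases hca : c = a
      · subst hca
        rw [if_pos (by simp [List.isPrefixOf])]
        rw [show List.drop (List.length [c]) (c :: t) = t from rfl]
        rw [ih t (acc + 1) (by omega)]
        simp
        omega
      · rw [if_neg (by simp [List.isPrefixOf]; exact fun hh => hca hh)]
        rw [ih t acc (by omega)]
        have : ¬ a = c := fun hh => hca hh.symm
        simp [this]

theorem pvPairs_cons_P (c : Char) (hc : c ≠ 'P') (t : List Char) :
    pvPairs c ('P' :: t) = pvPairs c t := by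
  cases t with
  | nil => simp [pvPairs]
  | cons b rest =>
    have : ¬ ((('P':Char) = c) ∧ b = 'P') := fun h => hc h.1.symm
    simp [pvPairs, this]

theorem pvGo_pair (c : Char) (hc : c ≠ 'P') : ∀ (fuel : Nat) (l : List Char) (acc : Nat),
    l.length ≤ fuel → PySem.Chars.count.go [c, 'P'] fuel l acc = acc + pvPairs c l := by
  intro fuel
  induction fuel using Nat.strong_induction_on with
  | _ n ih =>
    intro l acc h
    cases n with
    | zero => cases l with
        | nil => simp [pvGo_nil, pvPairs]
        | cons a t => simp at h
    | succ m =>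
      cases l with
      | nil => simp [pvGo_nil, pvPairs]
      | cons a t =>
        rw [pvGo_step]
        simp only [List.length_cons] at h
        by_cases hpre : List.isPrefixOf [c, 'P'] (a :: t) = true
        · cases t with
          | nil => simp [List.isPrefixOf] at hpre
          | cons b t' =>
            simp only [List.isPrefixOf, Bool.and_true,
              Bool.and_eq_true, beq_iff_eq] at hpre
            obtain ⟨hca, hPb⟩ := hpre
            subst hPb
            subst hca
            rw [if_pos (by simp [List.isPrefixOf])]
            rw [show List.drop (List.length [c, 'P']) (c :: 'P' :: t') = t' from rfl]
            rw [ih m (by omega) t' (acc + 1) (by simp at h; omega)]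
            simp only [pvPairs, pvPairs_cons_P c hc]
            simp
            omega
        · rw [if_neg hpre]
          rw [ih m (by omega) t acc (by omega)]
          cases t with
          | nil => simp [pvPairs]
          | cons b t' =>
            simp only [pvPairs]
            have : ¬ (a = c ∧ b = 'P') := by
              rintro ⟨h1, h2⟩
              subst h1 h2
              simp [List.isPrefixOf] at hpre
            simp [this]

theorem pvCount_single (l : List Char) (c : Char) :
    PySem.Chars.count l [c] = l.count c := by
  unfold PySem.Chars.count
  simp [pvGo_single c l.length l 0 (le_refl _)]

theorem pvCount_pair (l : List Char) (c : Char) (hc : c ≠ 'P') :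
    PySem.Chars.count l [c, 'P'] = pvPairs c l := by
  unfold PySem.Chars.count
  simp [pvGo_pair c hc l.length l 0 (le_refl _)]

theorem pvTally_eq (c : Char) (_hc : c ≠ 'P') : ∀ (l : List Char),
    pvTally c l = (l.dropLast.count c : Int) - (pvPairs c l : Int) := by
  intro l
  induction l with
  | nil => simp [pvTally, pvPairs]
  | cons a t ih =>
    cases t with
    | nil => simp [pvTally, pvPairs]
    | cons b rest =>
      simp only [pvTally, pvPairs, List.dropLast_cons_of_ne_nil (List.cons_ne_nil b rest),
        List.count_cons, ih]
      push_cast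
      by_cases hac : a = c <;> by_cases hbP : b = 'P' <;>
        simp [hac, hbP] <;> ring

theorem pvFold_eq : ∀ (cs : List Char) (k r : Int),
    (List.zip cs (cs.drop 1)).foldl
      (fun (st : Int × Int) p =>
        if p.2 = 'P' then st
        else
          let k := if p.1 = 'K' then st.1 + 1 else st.1
          let r := if p.1 = 'R' then st.2 + 1 else st.2
          (k, r))
      (k, r) = (k + pvTally 'K' cs, r + pvTally 'R' cs) := by
  intro cs
  induction cs with
  | nil => simp [pvTally]
  | cons a t ih =>
    intro k r
    cases t with
    | nil => simp [pvTally]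
    | cons b rest =>
      simp only [List.drop_one, List.tail_cons, List.zip_cons_cons, List.foldl_cons]
      by_cases hbP : b = 'P'
      · subst hbP
        rw [if_pos rfl]
        rw [show (List.zip ('P' :: rest) rest) = List.zip ('P' :: rest) (('P' :: rest).drop 1) by simp]
        rw [ih]
        simp [pvTally]
      · rw [if_neg hbP]
        rw [show (List.zip (b :: rest) rest) = List.zip (b :: rest) ((b :: rest).drop 1) by simp]
        rw [ih]
        simp only [pvTally, if_neg hbP]
        by_cases hK : a = 'K' <;> by_cases hR : a = 'R' <;>
          simp [hK, hR, Prod.ext_iff] <;> omega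

-- ===== VERDICT (by name: the statement is the Claim_ definition above) =====
theorem trypsin_specific_counts_py_spec : Claim_equal_trypsin_specific_counts_py := by
  intro seq _
  unfold Spec_trypsin_specific_counts_py trypsin_specific_counts_py trypsin_specific_counts_py_alt
  have hK : (('K':Char) ≠ 'P') := by decide
  have hR : (('R':Char) ≠ 'P') := by decide
  rw [show PySem.List.slice seq.toList (some 1) none = seq.toList.drop 1 by
    simp [PySem.List.slice_from]]
  rw [pvFold_eq seq.toList 0 0]
  have hslice : (PySem.Str.slice seq none (some (-1))).toList = seq.toList.dropLast :=
    PySem.Str.slice_to_neg_one seq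
  simp only [PySem.Str.count, hslice]
  rw [show ("K":String).toList = ['K'] from rfl, show ("R":String).toList = ['R'] from rfl,
      show ("KP":String).toList = ['K','P'] from rfl, show ("RP":String).toList = ['R','P'] from rfl]
  rw [pvCount_single, pvCount_single, pvCount_pair _ _ hK, pvCount_pair _ _ hR]
  rw [pvTally_eq 'K' hK, pvTally_eq 'R' hR]
  simp
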